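-- pv_equiv track=rewrite | github.com/pszsh/web-tuner | triad.py | count_effective_fingers
-- ===== SOURCE A (Python) =====
-- def count_effective_fingers(fingering, num_strings):
--     fretted = [(i, int(f)) for i, f in enumerate(fingering) if f not in ("x", "X", "0")]
--     if not fretted:
--         return 0
--     fingers_used = set()
--     frets = {}
--     for idx, fret in fretted:
--         if fret not in frets:
--             frets[fret] = []
--         frets[fret].append(idx)
--
--     for fret, strings in frets.items():
--         if len(strings) >= 2:
--             start = min(strings)
--             end = max(strings)
--             if end - start <= 4:
--                 valid = True
--                 for i in range(start, end + 1):
--                     val = fingering[i]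
--                     if val not in ("x", "X"):
--                         try:
--                             if int(val) < fret:
--                                 valid = False
--                                 break
--                         except ValueError:
--                             valid = False
--                             break
--                 if valid:
--                     fingers_used.add((fret, "barre"))
--
--     for fret, strings in frets.items():
--         if fret not in fingers_used:
--             fingers_used.add(fret)
--
--     return sum(2 if isinstance(f, tuple) and f[1] == "barre" else 1 for f in fingers_used)
-- ===== SOURCE B (Python) =====
-- def _covers(s, fret):
--     """May string s lie under a barre at `fret`? muted, or fretted at/above it."""
--     if s in ("x", "X"):
--         return True
--     try:
--         return int(s) >= fret
--     except ValueError: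
--         return False
--
--
-- def count_effective_fingers(fingering, num_strings):
--     # Single pass over the strings, no grouping structure: each fret value is
--     # scored exactly once, at its first (lowest-index) occurrence, by rescanning
--     # the fingering for that value.  1 point per distinct fret, 3 if it is a
--     # valid barre (>=2 strings, span <= 4, every covered string mutable).
--     total = 0
--     for i, f in enumerate(fingering):
--         if f in ("x", "X", "0"):
--             continue
--         fret = int(f)
--         occ = [j for j, g in enumerate(fingering)
--                if g not in ("x", "X", "0") and int(g) == fret]
--         if occ[0] != i:
--             continue  # this fret was already scored at its first string
--         lo, hi = occ[0], occ[-1]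
--         barre = (len(occ) >= 2 and hi - lo <= 4
--                  and all(_covers(s, fret) for s in fingering[lo:hi + 1]))
--         total += 3 if barre else 1
--     return total
-- ===== Notes on version B (the rewrite author's own statement) =====
-- stated objective: simpler
-- what changed: B removes A's fret->indices dict and its mixed int/tuple result set entirely: a single loop over the strings scores each fret once at its first string by rescanning the fingering for that fret's occurrences, adding 3 for a valid barre and 1 otherwise (reproducing A's int+tuple double count arithmetically).
import Mathlib
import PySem

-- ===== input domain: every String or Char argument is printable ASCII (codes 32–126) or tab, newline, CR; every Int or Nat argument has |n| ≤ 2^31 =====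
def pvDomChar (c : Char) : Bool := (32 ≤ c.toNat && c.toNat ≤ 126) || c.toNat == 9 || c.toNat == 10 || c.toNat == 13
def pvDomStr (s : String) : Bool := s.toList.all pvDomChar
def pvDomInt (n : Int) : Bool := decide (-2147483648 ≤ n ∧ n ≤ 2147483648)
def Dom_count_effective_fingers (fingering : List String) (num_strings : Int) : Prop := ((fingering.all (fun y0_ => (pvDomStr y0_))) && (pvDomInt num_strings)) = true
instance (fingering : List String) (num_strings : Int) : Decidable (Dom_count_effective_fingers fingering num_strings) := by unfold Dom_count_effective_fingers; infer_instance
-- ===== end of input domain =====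

-- B drops A's fret→indices dict and mixed int/tuple set: one pass over the strings that
-- scores each fret once, at its first string, by rescanning for that fret (objective: simpler).

-- ===== PORT A =====
-- fingers_used is a set of ints and (fret,"barre") tuples; encoded as PySem.Set (Int × Bool):
-- (k, true) ≙ the tuple (k, "barre"), (k, false) ≙ the int k (ints never equal tuples in Python).
def count_effective_fingers (fingering : List String) (num_strings : Int) : Int :=
  -- int(f) failing (Python ValueError) is excluded by Pre_; the .getD 0 is only reached outside it
  let fretted : List (Int × Int) :=
    (PySem.List.enumerate fingering 0).foldl
      (fun acc p =>
        if p.2 = "x" ∨ p.2 = "X" ∨ p.2 = "0" then acc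
        else acc ++ [(p.1, (PySem.Int.ofStr? p.2).getD 0)]) []
  if fretted = [] then 0
  else
    let frets : PySem.Dict Int (List Int) :=
      fretted.foldl
        (fun d q =>
          (if d.contains q.2 then d else d.insert q.2 ([] : List Int)).modify q.2 []
            (fun l => l ++ [q.1])) PySem.Dict.empty
    let fingers1 : PySem.Set (Int × Bool) :=
      frets.items.foldl
        (fun s p =>
          if p.2.length ≥ 2 then
            let start := (PySem.List.min? p.2 (fun x => x)).getD 0
            let stop  := (PySem.List.max? p.2 (fun x => x)).getD 0
            if stop - start ≤ 4 then
              -- the for-loop with break computes: every string in the window is x/X or parses ≥ fret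
              if (PySem.List.pyRange start (stop + 1) 1).all (fun i =>
                   let val := PySem.List.pyGetD fingering i ""
                   if val = "x" ∨ val = "X" then true
                   else match PySem.Int.ofStr? val with
                        | some w => decide (p.1 ≤ w)
                        | none => false)
              then PySem.Set.add s (p.1, true) else s
            else s
          else s) PySem.Set.empty
    let fingers2 : PySem.Set (Int × Bool) :=
      frets.items.foldl
        (fun s p => if s.contains (p.1, false) then s else PySem.Set.add s (p.1, false))
        fingers1
    (fingers2.map (fun f => if f.2 then (2 : Int) else 1)).sum

-- ===== PORT B =====
-- _covers(s, fret): the string may lie under a barre at `fret`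
def pvCovers (s : String) (fret : Int) : Bool :=
  if s = "x" ∨ s = "X" then true
  else match PySem.Int.ofStr? s with
       | some w => decide (fret ≤ w)
       | none => false

def count_effective_fingers_alt (fingering : List String) (num_strings : Int) : Int :=
  (PySem.List.enumerate fingering 0).foldl
    (fun total p =>
      if p.2 = "x" ∨ p.2 = "X" ∨ p.2 = "0" then total
      else
        let fret := (PySem.Int.ofStr? p.2).getD 0
        let occ : List Int :=
          (PySem.List.enumerate fingering 0).foldl
            (fun acc q =>
              if ¬(q.2 = "x" ∨ q.2 = "X" ∨ q.2 = "0") ∧ (PySem.Int.ofStr? q.2).getD 0 = fret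
              then acc ++ [q.1] else acc) []
        -- occ is never empty here (p's own index is in it): occ[0] / occ[-1] via pyGetD
        if PySem.List.pyGetD occ 0 0 ≠ p.1 then total
        else
          let lo := PySem.List.pyGetD occ 0 0
          let hi := PySem.List.pyGetD occ (-1) 0
          let barre := decide (occ.length ≥ 2) && decide (hi - lo ≤ 4) &&
            (PySem.List.slice fingering (some lo) (some (hi + 1))).all (fun s => pvCovers s fret)
          total + (if barre then 3 else 1)) 0

-- ===== PRECONDITION & SPEC =====
-- Pre_ excludes exactly the inputs where Python's int(f) raises ValueError (a string other
-- than "x"/"X"/"0" that does not parse as an int); both A and B raise there.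
def Pre_count_effective_fingers (fingering : List String) (num_strings : Int) : Prop :=
  ∀ s ∈ fingering, (s ≠ "x" ∧ s ≠ "X" ∧ s ≠ "0") → (PySem.Int.ofStr? s).isSome = true
instance (fingering : List String) (num_strings : Int) : Decidable (Pre_count_effective_fingers fingering num_strings) := by unfold Pre_count_effective_fingers; infer_instance
def pvWitness_count_effective_fingers : List String × Int := (["x", "3", "3", "0", "1", "3"], 6)

def Spec_count_effective_fingers (fingering : List String) (num_strings : Int) (out : Int) : Prop := out = count_effective_fingers_alt fingering num_strings
instance (fingering : List String) (num_strings : Int) (out : Int) : Decidable (Spec_count_effective_fingers fingering num_strings out) := by unfold Spec_count_effective_fingers; infer_instance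

-- ===== CLAIM (what is proved, stated in full; the proofs are below) =====
def Claim_equal_count_effective_fingers : Prop := ∀ (fingering : List String) (num_strings : Int), Dom_count_effective_fingers fingering num_strings → Pre_count_effective_fingers fingering num_strings → Spec_count_effective_fingers fingering num_strings (count_effective_fingers fingering num_strings)

-- ===== LEMMAS AND PROOFS =====

-- proof-only abbreviations for pieces of the two ports
abbrev pvSent (s : String) : Prop := s = "x" ∨ s = "X" ∨ s = "0"
def pvParse (p : Int × String) : Int × Int := (p.1, (PySem.Int.ofStr? p.2).getD 0)
def pvE (fingering : List String) : List (Int × String) := PySem.List.enumerate fingering 0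
def pvL (fingering : List String) : List (Int × Int) :=
  ((pvE fingering).filter (fun q => decide (¬ pvSent q.2))).map pvParse
def pvOcc (fingering : List String) (v : Int) : List Int :=
  ((pvE fingering).filter (fun q =>
    decide (¬ pvSent q.2 ∧ (PySem.Int.ofStr? q.2).getD 0 = v))).map Prod.fst
-- distinct values in first-occurrence order (proved equal to PySem.Set.ofList)
def pvKeys : List Int → List Int
  | [] => []
  | v :: t => v :: (pvKeys t).filter (fun y => decide (y ≠ v))
-- the barre test as A's port runs it on a dict entry (fret, index list)
def pvCondA (fingering : List String) (p : Int × List Int) : Bool :=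
  decide (p.2.length ≥ 2) &&
  decide ((PySem.List.max? p.2 (fun x => x)).getD 0 - (PySem.List.min? p.2 (fun x => x)).getD 0 ≤ 4) &&
  (PySem.List.pyRange ((PySem.List.min? p.2 (fun x => x)).getD 0)
      ((PySem.List.max? p.2 (fun x => x)).getD 0 + 1) 1).all (fun i =>
    pvCovers (PySem.List.pyGetD fingering i "") p.1)
-- the barre test as B's port runs it on a fret value
def pvCondB (fingering : List String) (v : Int) : Bool :=
  let occ := pvOcc fingering v
  decide (occ.length ≥ 2) &&
  decide (PySem.List.pyGetD occ (-1) 0 - PySem.List.pyGetD occ 0 0 ≤ 4) &&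
  (PySem.List.slice fingering (some (PySem.List.pyGetD occ 0 0))
      (some (PySem.List.pyGetD occ (-1) 0 + 1))).all (fun s => pvCovers s v)
def pvTermB (fingering : List String) (v : Int) : Int := if pvCondB fingering v then 3 else 1

-- ---- generic small lemmas ----
lemma pv_foldl_min_of_le (t : List Int) (a : Int) (h : ∀ y ∈ t, a ≤ y) : t.foldl min a = a := by
  induction t with
  | nil => rfl
  | cons b t ih =>
    rw [List.foldl_cons, min_eq_left (h b List.mem_cons_self)]
    exact ih (fun y hy => h y (List.mem_cons_of_mem _ hy))

lemma pv_foldl_max_sorted (t : List Int) (a : Int) (h : (a :: t).Pairwise (· < ·)) :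
    t.foldl max a = (a :: t).getLast (by simp) := by
  induction t generalizing a with
  | nil => rfl
  | cons b t ih =>
    have hab : a < b := (List.pairwise_cons.mp h).1 b List.mem_cons_self
    have h' : (b :: t).Pairwise (· < ·) :=
      ((List.pairwise_cons.mp h).2)
    rw [List.foldl_cons, max_eq_right hab.le, ih b h']
    exact (List.getLast_cons (by simp)).symm

lemma pv_all_take_drop {α : Type} (xs : List α) (g : α → Bool) (d : α) (a n : Nat)
    (h : a + n ≤ xs.length) :
    ((xs.drop a).take n).all g = (List.range n).all (fun k => g (xs.getD (a + k) d)) := by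
  induction n generalizing a with
  | zero => simp
  | succ n ih =>
    have ha : a < xs.length := by omega
    rw [List.drop_eq_getElem_cons ha, List.take_succ_cons, List.all_cons,
      List.range_succ_eq_map, List.all_cons, List.all_map, ih (a + 1) (by omega)]
    have h1 : xs.getD (a + 0) d = xs[a] := by
      simpa using List.getD_eq_getElem xs d ha
    have h2 : (fun k => g (xs.getD (a + 1 + k) d))
        = ((fun k => g (xs.getD (a + k) d)) ∘ Nat.succ) := by
      funext k
      simp only [Function.comp_apply]
      congr 2
      omega
    rw [h1, h2]

lemma pv_all_slice (xs : List String) (g : String → Bool) (lo hi : Int)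
    (h0 : 0 ≤ lo) (hlh : lo ≤ hi) (hhi : hi < xs.length) :
    (PySem.List.slice xs (some lo) (some (hi + 1))).all g
      = (PySem.List.pyRange lo (hi + 1) 1).all (fun i => g (PySem.List.pyGetD xs i "")) := by
  have h1 : (0:Int) ≤ hi + 1 := by omega
  rw [PySem.List.slice_toNat xs h0 h1,
    pv_all_take_drop xs g "" lo.toNat ((hi + 1).toNat - lo.toNat) (by omega),
    PySem.List.pyRange_one, List.all_map]
  have h2 : (hi + 1).toNat - lo.toNat = (hi + 1 - lo).toNat := by omega
  have h3 : ((fun i => g (PySem.List.pyGetD xs i "")) ∘ fun k : Nat => lo + (k : Int))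
      = fun k : Nat => g (xs.getD (lo.toNat + k) "") := by
    funext k
    simp only [Function.comp_apply]
    rw [show lo + (k : Int) = ((lo.toNat + k : Nat) : Int) by omega,
      PySem.List.pyGetD_natCast]
  rw [h2, h3]

-- ---- pvKeys is Set.ofList ----
lemma pv_foldl_add_eq (xs s : List Int) :
    xs.foldl PySem.Set.add s = s ++ (pvKeys xs).filter (fun v => !s.contains v) := by
  induction xs generalizing s with
  | nil => simp [pvKeys]
  | cons x t ih =>
    rw [List.foldl_cons]
    by_cases hm : x ∈ s
    · have hadd : PySem.Set.add s x = s := by simp [PySem.Set.add, hm]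
      rw [hadd, ih s]
      congr 1
      rw [show pvKeys (x :: t) = x :: (pvKeys t).filter (fun y => decide (y ≠ x)) from rfl,
        List.filter_cons, if_neg (by simp [hm]), List.filter_filter]
      apply List.filter_congr
      intro y _
      by_cases hys : y ∈ s
      · simp [hys]
      · have hyx : y ≠ x := fun he => hys (he ▸ hm)
        simp [hys, hyx]
    · have hadd : PySem.Set.add s x = s ++ [x] := by simp [PySem.Set.add, hm]
      rw [hadd, ih (s ++ [x]),
        show pvKeys (x :: t) = x :: (pvKeys t).filter (fun y => decide (y ≠ x)) from rfl,
        List.filter_cons, if_pos (by simp [hm]), List.filter_filter, List.append_assoc,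
        List.singleton_append]
      congr 2
      apply List.filter_congr
      intro y _
      by_cases hyx : y = x
      · subst hyx; simp
      · by_cases hys : y ∈ s <;> simp [hys, hyx]

lemma pv_ofList_eq_pvKeys (xs : List Int) : PySem.Set.ofList xs = pvKeys xs := by
  rw [show PySem.Set.ofList xs = xs.foldl PySem.Set.add [] from rfl, pv_foldl_add_eq]
  simp

-- ---- A's first loop builds pvL ----
lemma pv_fretted_eq (fingering : List String) :
    (pvE fingering).foldl
      (fun acc p =>
        if p.2 = "x" ∨ p.2 = "X" ∨ p.2 = "0" then acc
        else acc ++ [(p.1, (PySem.Int.ofStr? p.2).getD 0)]) []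
      = pvL fingering := by
  have hb : (fun (acc : List (Int × Int)) (p : Int × String) =>
      if p.2 = "x" ∨ p.2 = "X" ∨ p.2 = "0" then acc
      else acc ++ [(p.1, (PySem.Int.ofStr? p.2).getD 0)])
      = fun acc p => if ¬ pvSent p.2 then acc ++ [pvParse p] else acc := by
    funext acc p
    by_cases h : p.2 = "x" ∨ p.2 = "X" ∨ p.2 = "0"
    · simp [h, pvSent]
    · simp [h, pvSent, pvParse]
  rw [hb, PySem.List.foldl_append_ite (fun p : Int × String => ¬ pvSent p.2) pvParse]
  simp [pvL]

-- ---- A's dict step is a single modify ----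
lemma pv_stepA_eq_modify (d : PySem.Dict Int (List Int)) (q : Int × Int) :
    (if d.contains q.2 then d else d.insert q.2 ([] : List Int)).modify q.2 []
        (fun l => l ++ [q.1])
      = d.modify q.2 [] (fun l => l ++ [q.1]) := by
  by_cases hc : d.contains q.2 = true
  · rw [if_pos hc]
  · rw [if_neg hc]
    show (d.insert q.2 []).insert q.2 ((d.insert q.2 []).getD q.2 [] ++ [q.1])
        = d.insert q.2 (d.getD q.2 [] ++ [q.1])
    have hc' : d.contains q.2 = false := by simpa using hc
    rw [PySem.Dict.getD_insert_self, PySem.Dict.insert_insert_self]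
    simp [PySem.Dict.getD_of_not_contains, hc']

-- ---- the occurrence list, three ways ----
lemma pv_occ_eq_filter_L (fingering : List String) (v : Int) :
    ((pvL fingering).filter (fun q => q.2 == v)).map Prod.fst = pvOcc fingering v := by
  unfold pvL pvOcc
  rw [List.filter_map, List.map_map,
    show (Prod.fst ∘ pvParse) = (Prod.fst : Int × String → Int) from funext fun q => rfl,
    List.filter_filter]
  congr 1
  apply List.filter_congr
  intro q _
  by_cases hs : pvSent q.2 <;> by_cases hv : (PySem.Int.ofStr? q.2).getD 0 = v <;>
    simp [pvParse, hs, hv]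

lemma pv_occ_pairwise (fingering : List String) (v : Int) :
    (pvOcc fingering v).Pairwise (· < ·) := by
  unfold pvOcc
  rw [List.pairwise_map]
  exact List.Pairwise.filter _ (PySem.List.pairwise_lt_enumerate fingering 0)

lemma pv_occ_bounds (fingering : List String) (v : Int) :
    ∀ i ∈ pvOcc fingering v, 0 ≤ i ∧ i < (fingering.length : Int) := by
  intro i hi
  unfold pvOcc at hi
  obtain ⟨q, hq, rfl⟩ := List.mem_map.mp hi
  have hqE : q ∈ pvE fingering := List.mem_of_mem_filter hq
  obtain ⟨k, hk, rfl⟩ := (PySem.List.mem_enumerate_iff _ _ _).mp hqE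
  constructor <;> simp <;> omega

lemma pv_L_fst_nodup (fingering : List String) : ((pvL fingering).map Prod.fst).Nodup := by
  unfold pvL
  rw [List.map_map,
    show (Prod.fst ∘ pvParse) = (Prod.fst : Int × String → Int) from funext fun q => rfl]
  have hp : ((((pvE fingering).filter (fun q => decide (¬ pvSent q.2)))).map Prod.fst).Pairwise
      ((· < ·) : Int → Int → Prop) := by
    rw [List.pairwise_map]
    exact List.Pairwise.filter _ (PySem.List.pairwise_lt_enumerate fingering 0)
  exact hp.imp (fun h => ne_of_lt h)

-- ---- A's dict, characterised ----
lemma pv_dict_items (fingering : List String) :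
    ((pvL fingering).foldl
        (fun d q =>
          (if d.contains q.2 then d else d.insert q.2 ([] : List Int)).modify q.2 []
            (fun l => l ++ [q.1])) PySem.Dict.empty).items
      = (pvKeys ((pvL fingering).map Prod.snd)).map (fun v => (v, pvOcc fingering v)) := by
  have hstep : (fun (d : PySem.Dict Int (List Int)) (q : Int × Int) =>
      (if d.contains q.2 then d else d.insert q.2 ([] : List Int)).modify q.2 []
        (fun l => l ++ [q.1]))
      = fun d q => d.modify q.2 [] (fun l => l ++ [q.1]) := by
    funext d q; exact pv_stepA_eq_modify d q
  rw [hstep]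
  have hkeys := PySem.Dict.keys_foldl_modify_key (pvL fingering) Prod.snd ([] : List Int)
    (fun _ x => fun l => l ++ [x.1]) PySem.Dict.empty
  have hnodup := PySem.Dict.nodup_keys_foldl_modify_key (pvL fingering) Prod.snd ([] : List Int)
    (fun _ x => fun l => l ++ [x.1]) PySem.Dict.empty (by simp)
  have hswap : (pvL fingering).foldl (fun d q => d.modify q.2 [] (fun l => l ++ [q.1]))
        PySem.Dict.empty
      = ((pvL fingering).map Prod.swap).foldl
          (fun d p => d.modify p.1 [] (fun l => l ++ [p.2])) PySem.Dict.empty := by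
    rw [List.foldl_map]
    rfl
  have hgetD : ∀ v, ((pvL fingering).foldl (fun d q => d.modify q.2 [] (fun l => l ++ [q.1]))
        PySem.Dict.empty).getD v [] = pvOcc fingering v := by
    intro v
    rw [hswap, PySem.Dict.getD_foldl_modify_append, List.filter_map, List.map_map,
      ← pv_occ_eq_filter_L fingering v]
    rfl
  rw [PySem.Dict.items_eq_map_keys _ hnodup ([] : List Int), hkeys]
  rw [show PySem.Dict.empty.keys = ([] : List Int) from rfl, PySem.Set.update_nil_left,
    pv_ofList_eq_pvKeys]
  exact List.map_congr_left (fun v _ => by rw [hgetD v])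

-- ---- the per-fret tests agree ----
lemma pv_condA_eq_condB (fingering : List String) (v : Int) (h : pvOcc fingering v ≠ []) :
    pvCondA fingering (v, pvOcc fingering v) = pvCondB fingering v := by
  obtain ⟨a, t, hat⟩ : ∃ a t, pvOcc fingering v = a :: t := by
    cases hocc : pvOcc fingering v with
    | nil => exact absurd hocc h
    | cons a t => exact ⟨a, t, rfl⟩
  have hpw := pv_occ_pairwise fingering v
  rw [hat] at hpw
  have hbounds := pv_occ_bounds fingering v
  have hlast := pv_foldl_max_sorted t a hpw
  have hmin : (PySem.List.min? (pvOcc fingering v) (fun x => x)).getD 0 = a := by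
    rw [hat, PySem.List.min?_id_cons, Option.getD_some,
      pv_foldl_min_of_le t a (fun y hy => ((List.pairwise_cons.mp hpw).1 y hy).le)]
  have hmax : (PySem.List.max? (pvOcc fingering v) (fun x => x)).getD 0
      = (a :: t).getLast (by simp) := by
    rw [hat, PySem.List.max?_id_cons, Option.getD_some, hlast]
  have hget0 : PySem.List.pyGetD (pvOcc fingering v) 0 0 = a := by
    rw [hat, PySem.List.pyGetD_zero_cons]
  have hgetm1 : PySem.List.pyGetD (pvOcc fingering v) (-1) 0
      = (a :: t).getLast (by simp) := by
    rw [hat]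
    exact PySem.List.pyGetD_neg_one _ _ (by simp)
  have hmem_a : a ∈ pvOcc fingering v := by rw [hat]; exact List.mem_cons_self
  have hmem_last : (a :: t).getLast (by simp) ∈ pvOcc fingering v := by
    rw [hat]; exact List.getLast_mem _
  have h0a : (0:Int) ≤ a := (hbounds a hmem_a).1
  have hale : a ≤ (a :: t).getLast (by simp) := by
    rw [← hlast]; exact (PySem.List.le_foldl_max t a).1
  have hlt : (a :: t).getLast (by simp) < (fingering.length : Int) :=
    (hbounds _ hmem_last).2
  simp only [pvCondA, pvCondB]
  rw [hmin, hmax, hget0, hgetm1, hat,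
    pv_all_slice fingering (fun s => pvCovers s v) a ((a :: t).getLast (by simp)) h0a hale hlt]

-- ---- A's two set loops (unchanged from a direct reading of the port) ----
lemma pv_fold_barre (fingering : List String) (KL : List (Int × List Int)) (s0 : List (Int × Bool))
    (hnd : (KL.map Prod.fst).Nodup) (h0 : ∀ p ∈ KL, ((p.1, true) : Int × Bool) ∉ s0) :
    KL.foldl (fun s p => if pvCondA fingering p then PySem.Set.add s (p.1, true) else s) s0
      = s0 ++ (KL.filter (pvCondA fingering)).map (fun p => (p.1, true)) := by
  induction KL generalizing s0 with
  | nil => simp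
  | cons a t ih =>
    have hnd' : (t.map Prod.fst).Nodup := (List.nodup_cons.mp (by simpa using hnd)).2
    have hka : a.1 ∉ t.map Prod.fst := (List.nodup_cons.mp (by simpa using hnd)).1
    have hmem : ∀ p ∈ t, ((p.1, true) : Int × Bool) ∉ s0 ++ [(a.1, true)] := by
      intro p hp hin
      rcases List.mem_append.mp hin with h1 | h1
      · exact h0 p (List.mem_cons_of_mem _ hp) h1
      · have : p.1 = a.1 := by simpa using h1
        exact hka (this ▸ List.mem_map_of_mem hp)
    by_cases hca : pvCondA fingering a = true
    · rw [List.foldl_cons, if_pos hca]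
      have hadd : PySem.Set.add s0 (a.1, true) = s0 ++ [(a.1, true)] := by
        simp [PySem.Set.add, PySem.Set.contains, h0 a List.mem_cons_self]
      rw [hadd, ih _ hnd' hmem, List.filter_cons, if_pos hca, List.map_cons, List.append_assoc,
        List.singleton_append]
    · rw [List.foldl_cons, if_neg hca,
        ih _ hnd' (fun p hp => h0 p (List.mem_cons_of_mem _ hp)), List.filter_cons, if_neg hca]

lemma pv_fold_ints (KL : List (Int × List Int)) (s0 : List (Int × Bool))
    (hnd : (KL.map Prod.fst).Nodup) (h0 : ∀ p ∈ KL, ((p.1, false) : Int × Bool) ∉ s0) :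
    KL.foldl (fun s p => if (PySem.Set.contains s (p.1, false)) = true then s else PySem.Set.add s (p.1, false)) s0
      = s0 ++ KL.map (fun p => (p.1, false)) := by
  induction KL generalizing s0 with
  | nil => simp
  | cons a t ih =>
    have hnd' : (t.map Prod.fst).Nodup := (List.nodup_cons.mp (by simpa using hnd)).2
    have hka : a.1 ∉ t.map Prod.fst := (List.nodup_cons.mp (by simpa using hnd)).1
    have hmem : ∀ p ∈ t, ((p.1, false) : Int × Bool) ∉ s0 ++ [(a.1, false)] := by
      intro p hp hin
      rcases List.mem_append.mp hin with h1 | h1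
      · exact h0 p (List.mem_cons_of_mem _ hp) h1
      · have : p.1 = a.1 := by simpa using h1
        exact hka (this ▸ List.mem_map_of_mem hp)
    rw [List.foldl_cons,
      if_neg (by simpa [PySem.Set.contains, List.contains_iff_mem] using h0 a List.mem_cons_self)]
    have hadd : PySem.Set.add s0 (a.1, false) = s0 ++ [(a.1, false)] := by
      simp [PySem.Set.add, PySem.Set.contains, h0 a List.mem_cons_self]
    rw [hadd, ih _ hnd' hmem, List.map_cons, List.append_assoc, List.singleton_append]

lemma pv_sum_three (c : (Int × List Int) → Bool) (KL : List (Int × List Int)) :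
    (KL.map (fun p => if c p then (3 : Int) else 1)).sum
      = 2 * ((KL.filter c).length : Int) + (KL.length : Int) := by
  induction KL with
  | nil => simp
  | cons a t ih =>
    by_cases hc : c a <;> simp [hc, ih] <;> ring

-- ---- A as a sum over the distinct frets ----
lemma pv_A_eq_sum (fingering : List String) (num_strings : Int) :
    count_effective_fingers fingering num_strings
      = ((pvKeys ((pvL fingering).map Prod.snd)).map (pvTermB fingering)).sum := by
  simp only [count_effective_fingers]
  rw [show PySem.List.enumerate fingering 0 = pvE fingering from rfl, pv_fretted_eq fingering]
  by_cases hE : pvL fingering = []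
  · rw [if_pos hE, hE]
    simp [pvKeys]
  · rw [if_neg hE, pv_dict_items fingering]
    set KL := (pvKeys ((pvL fingering).map Prod.snd)).map (fun v => (v, pvOcc fingering v))
      with hKLdef
    have hbody1 : (fun (s : PySem.Set (Int × Bool)) (p : Int × List Int) =>
        if p.2.length ≥ 2 then
          let start := (PySem.List.min? p.2 (fun x => x)).getD 0
          let stop  := (PySem.List.max? p.2 (fun x => x)).getD 0
          if stop - start ≤ 4 then
            if (PySem.List.pyRange start (stop + 1) 1).all (fun i =>
                 let val := PySem.List.pyGetD fingering i ""
                 if val = "x" ∨ val = "X" then true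
                 else match PySem.Int.ofStr? val with
                      | some w => decide (p.1 ≤ w)
                      | none => false)
            then PySem.Set.add s (p.1, true) else s
          else s
        else s)
        = (fun s p => if pvCondA fingering p then PySem.Set.add s (p.1, true) else s) := by
      funext s p
      by_cases h2 : p.2.length ≥ 2 <;>
        by_cases h4 : (PySem.List.max? p.2 (fun x => x)).getD 0
            - (PySem.List.min? p.2 (fun x => x)).getD 0 ≤ 4 <;>
          simp [pvCondA, pvCovers, h2, h4]
    rw [hbody1]
    have hnd : (KL.map Prod.fst).Nodup := by
      rw [hKLdef, List.map_map,
        show (Prod.fst ∘ fun v => (v, pvOcc fingering v)) = id from funext fun v => rfl,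
        List.map_id, ← pv_ofList_eq_pvKeys]
      exact PySem.Set.nodup_ofList _
    rw [show (PySem.Set.empty : PySem.Set (Int × Bool)) = [] from rfl,
      pv_fold_barre fingering KL [] hnd (by simp), List.nil_append,
      pv_fold_ints KL _ hnd (by simp),
      List.map_append, List.sum_append, List.map_map, List.map_map]
    have e1 : ((fun f : Int × Bool => if f.2 then (2 : Int) else 1)
        ∘ (fun p : Int × List Int => (p.1, true))) = fun _ => (2 : Int) := by
      funext p; simp
    have e2 : ((fun f : Int × Bool => if f.2 then (2 : Int) else 1)
        ∘ (fun p : Int × List Int => (p.1, false))) = fun _ => (1 : Int) := by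
      funext p; simp
    rw [e1, e2, PySem.List.sum_map_const_int, PySem.List.sum_map_const_int]
    have hKL : (pvKeys ((pvL fingering).map Prod.snd)).map (pvTermB fingering)
        = KL.map (fun p => if pvCondA fingering p then (3 : Int) else 1) := by
      rw [hKLdef, List.map_map]
      apply List.map_congr_left
      intro v hv
      have hvmem : v ∈ (pvL fingering).map Prod.snd := by
        rw [← pv_ofList_eq_pvKeys] at hv
        simpa [PySem.Set.mem_ofList] using hv
      have hocc : pvOcc fingering v ≠ [] := by
        obtain ⟨q, hqL, hq2⟩ := List.mem_map.mp hvmem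
        intro hnil
        have hq1 : q.1 ∈ pvOcc fingering v := by
          rw [← pv_occ_eq_filter_L]
          exact List.mem_map_of_mem (List.mem_filter.mpr ⟨hqL, by simp [hq2]⟩)
        simp [hnil] at hq1
      simp only [Function.comp_apply, pvTermB]
      rw [← pv_condA_eq_condB fingering v hocc]
    rw [hKL, pv_sum_three]
    simp
    ring

-- ---- B collapses to the first-occurrence sum ----
lemma pv_B_eq_sum (fingering : List String) (num_strings : Int) :
    count_effective_fingers_alt fingering num_strings
      = ((pvL fingering).map (fun q =>
          if (pvOcc fingering q.2).getD 0 0 = q.1 then pvTermB fingering q.2 else 0)).sum := by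
  simp only [count_effective_fingers_alt]
  rw [show PySem.List.enumerate fingering 0 = pvE fingering from rfl]
  have hinner : ∀ fret : Int,
      (pvE fingering).foldl
        (fun acc (q : Int × String) =>
          if ¬(q.2 = "x" ∨ q.2 = "X" ∨ q.2 = "0") ∧ (PySem.Int.ofStr? q.2).getD 0 = fret
          then acc ++ [q.1] else acc) []
      = pvOcc fingering fret := by
    intro fret
    rw [PySem.List.foldl_append_ite
      (fun q : Int × String =>
        ¬(q.2 = "x" ∨ q.2 = "X" ∨ q.2 = "0") ∧ (PySem.Int.ofStr? q.2).getD 0 = fret)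
      Prod.fst, List.nil_append]
    rfl
  have hb : (fun (total : Int) (p : Int × String) =>
      if p.2 = "x" ∨ p.2 = "X" ∨ p.2 = "0" then total
      else
        let fret := (PySem.Int.ofStr? p.2).getD 0
        let occ : List Int :=
          (pvE fingering).foldl
            (fun acc q =>
              if ¬(q.2 = "x" ∨ q.2 = "X" ∨ q.2 = "0") ∧ (PySem.Int.ofStr? q.2).getD 0 = fret
              then acc ++ [q.1] else acc) []
        if PySem.List.pyGetD occ 0 0 ≠ p.1 then total
        else
          let lo := PySem.List.pyGetD occ 0 0
          let hi := PySem.List.pyGetD occ (-1) 0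
          let barre := decide (occ.length ≥ 2) && decide (hi - lo ≤ 4) &&
            (PySem.List.slice fingering (some lo) (some (hi + 1))).all (fun s => pvCovers s fret)
          total + (if barre then 3 else 1))
      = fun total p => if ¬ pvSent p.2 then
          (if PySem.List.pyGetD (pvOcc fingering ((PySem.Int.ofStr? p.2).getD 0)) 0 0 = p.1
           then total + pvTermB fingering ((PySem.Int.ofStr? p.2).getD 0) else total)
        else total := by
    funext total p
    by_cases hs : pvSent p.2
    · have hs' : p.2 = "x" ∨ p.2 = "X" ∨ p.2 = "0" := hs
      simp only [hs', if_true, not_true_eq_false, if_false]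
    · have hs' : ¬(p.2 = "x" ∨ p.2 = "X" ∨ p.2 = "0") := hs
      simp only [hs', if_false, not_false_eq_true, if_true, hinner]
      by_cases hg : PySem.List.pyGetD (pvOcc fingering ((PySem.Int.ofStr? p.2).getD 0)) 0 0 = p.1
      · rw [if_neg (by simp [hg]), if_pos hg]
        rfl
      · rw [if_pos hg, if_neg hg]
  rw [hb, PySem.List.foldl_ite_eq_foldl_filter (fun p : Int × String => ¬ pvSent p.2)
    (fun total (p : Int × String) =>
      if PySem.List.pyGetD (pvOcc fingering ((PySem.Int.ofStr? p.2).getD 0)) 0 0 = p.1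
      then total + pvTermB fingering ((PySem.Int.ofStr? p.2).getD 0) else total)
    (pvE fingering) 0]
  have hfold : ((pvE fingering).filter (fun q => decide (¬ pvSent q.2))).foldl
      (fun total (p : Int × String) =>
        if PySem.List.pyGetD (pvOcc fingering ((PySem.Int.ofStr? p.2).getD 0)) 0 0 = p.1
        then total + pvTermB fingering ((PySem.Int.ofStr? p.2).getD 0) else total) 0
      = (pvL fingering).foldl
        (fun t (q : Int × Int) =>
          if PySem.List.pyGetD (pvOcc fingering q.2) 0 0 = q.1 then t + pvTermB fingering q.2 else t) 0 := by
    rw [show pvL fingering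
        = ((pvE fingering).filter (fun q => decide (¬ pvSent q.2))).map pvParse from rfl,
      List.foldl_map]
    rfl
  rw [hfold]
  have hg2 : (fun t (q : Int × Int) =>
      if PySem.List.pyGetD (pvOcc fingering q.2) 0 0 = q.1 then t + pvTermB fingering q.2 else t)
      = fun t q => t + (if (pvOcc fingering q.2).getD 0 0 = q.1 then pvTermB fingering q.2 else 0) := by
    funext t q
    rw [PySem.List.pyGetD_zero]
    by_cases hgq : (pvOcc fingering q.2).getD 0 0 = q.1
    · rw [if_pos hgq, if_pos hgq]
    · rw [if_neg hgq, if_neg hgq, add_zero]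
  rw [hg2, PySem.List.foldl_add, zero_add]

-- ---- first-occurrence sum = sum over distinct values ----
lemma pv_first_sum (fingering : List String) (M P : List (Int × Int))
    (hnd : (((P ++ M)).map Prod.fst).Nodup)
    (hL : pvL fingering = P ++ M) :
    (M.map (fun q =>
        if (pvOcc fingering q.2).getD 0 0 = q.1 then pvTermB fingering q.2 else 0)).sum
      = (((pvKeys (M.map Prod.snd)).filter
            (fun v => !(P.map Prod.snd).contains v)).map (pvTermB fingering)).sum := by
  induction M generalizing P with
  | nil => simp [pvKeys]
  | cons a M' ih =>
    have hnd' : (((P ++ [a]) ++ M').map Prod.fst).Nodup := by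
      rw [List.append_assoc, List.singleton_append]; exact hnd
    have hL' : pvL fingering = (P ++ [a]) ++ M' := by
      rw [List.append_assoc, List.singleton_append]; exact hL
    have hocc : pvOcc fingering a.2
        = (P.filter (fun q => q.2 == a.2)).map Prod.fst
          ++ ((a :: M').filter (fun q => q.2 == a.2)).map Prod.fst := by
      rw [← pv_occ_eq_filter_L fingering a.2, hL, List.filter_append, List.map_append]
    have hfa : ((a :: M').filter (fun q => q.2 == a.2)).map Prod.fst
        = a.1 :: (M'.filter (fun q => q.2 == a.2)).map Prod.fst := by
      rw [List.filter_cons, if_pos (by simp)]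
      rfl
    rw [List.map_cons, List.sum_cons, ih (P ++ [a]) hnd' hL']
    by_cases hPa : a.2 ∈ P.map Prod.snd
    · -- a's fret already appeared in the prefix: the head of its occurrence list lies in P
      have hFne : (P.filter (fun q => q.2 == a.2)) ≠ [] := by
        obtain ⟨q0, hq0P, hq02⟩ := List.mem_map.mp hPa
        intro hnil
        have hq0m : q0 ∈ P.filter (fun q => q.2 == a.2) :=
          List.mem_filter.mpr ⟨hq0P, by simp [hq02]⟩
        simp [hnil] at hq0m
      have hhead : (pvOcc fingering a.2).getD 0 0 ∈ P.map Prod.fst := by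
        rw [hocc]
        cases hFc : P.filter (fun q => q.2 == a.2) with
        | nil => exact absurd hFc hFne
        | cons x xs =>
          simp only [List.map_cons, List.cons_append, List.getD_cons_zero]
          exact List.mem_map_of_mem (List.mem_of_mem_filter (hFc ▸ List.mem_cons_self))
      have ha1 : a.1 ∉ P.map Prod.fst := by
        rw [List.map_append] at hnd
        have hdisj := List.disjoint_of_nodup_append hnd
        intro hmem
        exact hdisj hmem (by simp)
      have hcond : ¬ ((pvOcc fingering a.2).getD 0 0 = a.1) := by
        intro he; exact ha1 (he ▸ hhead)
      rw [if_neg hcond, zero_add]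
      have hfilt : (pvKeys ((a :: M').map Prod.snd)).filter
            (fun v => !(P.map Prod.snd).contains v)
          = (pvKeys (M'.map Prod.snd)).filter
            (fun v => !((P ++ [a]).map Prod.snd).contains v) := by
        rw [show (a :: M').map Prod.snd = a.2 :: M'.map Prod.snd from rfl,
          show pvKeys (a.2 :: M'.map Prod.snd)
            = a.2 :: (pvKeys (M'.map Prod.snd)).filter (fun y => decide (y ≠ a.2)) from rfl,
          List.filter_cons, if_neg (by simpa using hPa), List.filter_filter]
        apply List.filter_congr
        intro v _
        by_cases hv2 : v = a.2
        · subst hv2; simp [hPa, List.map_append]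
        · by_cases hvP : v ∈ P.map Prod.snd <;> simp [hv2, hvP, List.map_append]
      rw [hfilt]
    · -- a is the first string on its fret
      have hF : (P.filter (fun q => q.2 == a.2)) = [] := by
        rw [List.filter_eq_nil_iff]
        intro q hq hbeq
        have hq2 : q.2 = a.2 := by simpa using hbeq
        exact hPa (hq2 ▸ List.mem_map_of_mem hq)
      have hcond : (pvOcc fingering a.2).getD 0 0 = a.1 := by
        rw [hocc, hF, List.map_nil, List.nil_append, hfa, List.getD_cons_zero]
      rw [if_pos hcond]
      have hfilt : (pvKeys ((a :: M').map Prod.snd)).filter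
            (fun v => !(P.map Prod.snd).contains v)
          = a.2 :: (pvKeys (M'.map Prod.snd)).filter
            (fun v => !((P ++ [a]).map Prod.snd).contains v) := by
        rw [show (a :: M').map Prod.snd = a.2 :: M'.map Prod.snd from rfl,
          show pvKeys (a.2 :: M'.map Prod.snd)
            = a.2 :: (pvKeys (M'.map Prod.snd)).filter (fun y => decide (y ≠ a.2)) from rfl,
          List.filter_cons, if_pos (by simpa using hPa), List.filter_filter]
        congr 1
        apply List.filter_congr
        intro v _
        by_cases hv2 : v = a.2
        · subst hv2; simp [List.map_append]
        · by_cases hvP : v ∈ P.map Prod.snd <;> simp [hv2, hvP, List.map_append]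
      rw [hfilt, List.map_cons, List.sum_cons]

lemma pv_main (fingering : List String) (num_strings : Int) :
    count_effective_fingers fingering num_strings = count_effective_fingers_alt fingering num_strings := by
  rw [pv_A_eq_sum fingering num_strings, pv_B_eq_sum fingering num_strings,
    pv_first_sum fingering (pvL fingering) [] (by simpa using pv_L_fst_nodup fingering)
      (by simp)]
  simp

-- ===== VERDICT (by name: the statement is the Claim_ definition above) =====
theorem count_effective_fingers_spec : Claim_equal_count_effective_fingers := by
  intro fingering num_strings _ _
  exact pv_main fingering num_strings
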